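-- pv_equiv track=rewrite | github.com/dmitrav/stepik-algorithms | divide/dots_and_cuts.py | quick_partition
-- ===== SOURCE A (Python) =====
-- def quick_partition(arr, left=True):
--     """ Make a partition as in 2-way quicksort to find elements smaller than the first one in arr.
--         Still SLOW. """
--
--     i, li = 1, 0
--     dot = arr[li]
--     while i <= len(arr)-1:
--         if left:
--             if arr[i] <= dot:
--                 arr[i], arr[li] = arr[li], arr[i]
--                 i += 1
--                 li += 1
--             else:
--                 break
--         else:
--             if arr[i] < dot:
--                 arr[i], arr[li] = arr[li], arr[i]
--                 i += 1
--                 li += 1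
--             else:
--                 break
--     return li
-- ===== SOURCE B (Python) =====
-- def quick_partition(arr, left=True):
--     """Count-then-rotate: one counting pass, then one bulk prefix rotation."""
--     dot = arr[0]
--     li = 0
--     for x in arr[1:]:
--         if (x <= dot) if left else (x < dot):
--             li += 1
--         else:
--             break
--     arr[:li + 1] = arr[1:li + 1] + [dot]
--     return li
-- ===== Notes on version B (the rewrite author's own statement) =====
-- stated objective: simpler
-- what changed: Replaces the interleaved per-element compare-and-swap loop with a pure counting pass over the tail followed by one bulk slice assignment that left-rotates the prefix; same return value and same final array state.
import Mathlib
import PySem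

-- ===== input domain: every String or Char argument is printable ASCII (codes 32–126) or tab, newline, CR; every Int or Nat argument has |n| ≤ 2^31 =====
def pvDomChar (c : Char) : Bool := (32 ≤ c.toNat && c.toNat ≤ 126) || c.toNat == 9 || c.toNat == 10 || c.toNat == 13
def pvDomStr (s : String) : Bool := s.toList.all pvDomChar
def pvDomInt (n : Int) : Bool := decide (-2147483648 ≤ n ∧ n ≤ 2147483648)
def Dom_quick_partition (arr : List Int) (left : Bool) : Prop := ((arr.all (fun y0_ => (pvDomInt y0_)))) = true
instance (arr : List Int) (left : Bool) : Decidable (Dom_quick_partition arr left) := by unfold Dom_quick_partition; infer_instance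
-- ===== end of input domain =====

-- B changes the decomposition (count-then-rotate instead of compare-and-swap); equivalence is about the RETURN value
-- (both Pythons mutate arr identically to the same final state; that mutation is not modelled here).

-- ===== PORT A =====
-- literal port of A's while loop: state (arr, i, li), swap arr[i],arr[li] each accepted step; fuel = arr.length bounds the loop
def qpLoopA (dot : Int) (left : Bool) : Nat → List Int → Nat → Int → Int
  | 0, _, _, li => li
  | fuel + 1, arr, i, li =>
    if i ≤ arr.length - 1 then
      let ai := (PySem.List.pyGet? arr (i : Int)).getD 0
      let al := (PySem.List.pyGet? arr ((i - 1 : Nat) : Int)).getD 0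
      if (if left then ai ≤ dot else ai < dot) then
        qpLoopA dot left fuel ((arr.set i al).set (i - 1) ai) (i + 1) (li + 1)
      else li
    else li

def quick_partition (arr : List Int) (left : Bool) : Int :=
  let dot := (PySem.List.pyGet? arr 0).getD 0   -- Python reads the first element here; raises on empty arr, excluded by Pre_
  qpLoopA dot left arr.length arr 1 0

-- ===== PORT B =====
-- counting pass of Source B: walk the elements after the first, +1 while the comparison holds, stop at the first failure
def qpCountB (dot : Int) (left : Bool) : List Int → Int
  | [] => 0
  | x :: xs => if (if left then x ≤ dot else x < dot) then 1 + qpCountB dot left xs else 0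

def quick_partition_alt (arr : List Int) (left : Bool) : Int :=
  match arr with
  | [] => 0            -- Source B raises here reading the first element; excluded by Pre_
  | dot :: rest => qpCountB dot left rest

-- ===== PRECONDITION & SPEC =====
-- Pre_ excludes only the empty list, where both Pythons raise IndexError reading the first element
def Pre_quick_partition (arr : List Int) (left : Bool) : Prop := arr ≠ []
instance (arr : List Int) (left : Bool) : Decidable (Pre_quick_partition arr left) := by unfold Pre_quick_partition; infer_instance
def pvWitness_quick_partition : List Int × Bool := ([3, 1, 2, 5, 0], true)

def Spec_quick_partition (arr : List Int) (left : Bool) (out : Int) : Prop := out = quick_partition_alt arr left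
instance (arr : List Int) (left : Bool) (out : Int) : Decidable (Spec_quick_partition arr left out) := by unfold Spec_quick_partition; infer_instance

-- ===== CLAIM (what is proved, stated in full; the proofs are below) =====
def Claim_equal_quick_partition : Prop := ∀ (arr : List Int) (left : Bool), Dom_quick_partition arr left → Pre_quick_partition arr left → Spec_quick_partition arr left (quick_partition arr left)

-- ===== LEMMAS AND PROOFS =====

-- the two writes of a swap at indices i-1 and i do not touch the suffix from i+1
lemma drop_set_set (arr : List Int) (i : Nat) (a b : Int) :
    ((arr.set i a).set (i - 1) b).drop (i + 1) = arr.drop (i + 1) := by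
  apply List.ext_getElem
  · simp
  · intro n h1 h2
    simp [List.getElem_drop, List.getElem_set]
    omega

-- loop invariant: A's loop from position i returns li + (count of the accepted run in arr.drop i)
lemma qpLoopA_eq (dot : Int) (left : Bool) :
    ∀ (fuel : Nat) (arr : List Int) (i : Nat) (li : Int),
      1 ≤ i → arr.length ≤ fuel + i →
      qpLoopA dot left fuel arr i li = li + qpCountB dot left (arr.drop i) := by
  intro fuel
  induction fuel with
  | zero =>
    intro arr i li h1 h2
    have : arr.drop i = [] := List.drop_eq_nil_of_le (by omega)
    simp [qpLoopA, this, qpCountB]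
  | succ fuel ih =>
    intro arr i li h1 h2
    by_cases hc : i ≤ arr.length - 1
    · have hlt : i < arr.length := by
        rcases Nat.eq_zero_or_pos arr.length with h | h
        · omega
        · omega
      have hget : PySem.List.pyGet? arr (i : Int) = some arr[i] :=
        PySem.List.pyGet?_ofNat (h := hlt)
      have hdrop : arr.drop i = arr[i] :: arr.drop (i + 1) :=
        List.drop_eq_getElem_cons hlt
      simp only [qpLoopA, hc, if_true, hget, Option.getD_some]
      by_cases hcond : (if left then arr[i] ≤ dot else arr[i] < dot)
      · simp only [hcond, if_true]
        rw [ih _ (i + 1) (li + 1) (by omega) (by simp; omega)]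
        rw [drop_set_set, hdrop]
        simp [qpCountB, hcond]
        ring
      · rw [if_neg hcond, hdrop]
        simp only [qpCountB, if_neg hcond, add_zero]
    · have hge : arr.length ≤ i := by omega
      have : arr.drop i = [] := List.drop_eq_nil_of_le hge
      simp [qpLoopA, hc, this, qpCountB]

-- ===== VERDICT (by name: the statement is the Claim_ definition above) =====
theorem quick_partition_spec : Claim_equal_quick_partition := by
  intro arr left _ hpre
  unfold Spec_quick_partition
  match arr, hpre with
  | dot :: rest, _ =>
    unfold quick_partition quick_partition_alt
    simp only [PySem.List.pyGet?_zero_cons, Option.getD_some]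
    rw [qpLoopA_eq dot left (dot :: rest).length (dot :: rest) 1 0 (by omega) (by simp)]
    simp
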